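-- pv_equiv track=rewrite | github.com/pritamleo841/GFG-CODE-SOLUTIONS-PYTHON | Difficulty: Basic/First 1 in a Sorted Binary Array/first-1-in-a-sorted-binary-array.py | firstIndex
-- ===== SOURCE A (Python) =====
-- def firstIndex(arr):
--     #binary search - O(logn)
--     low,high=0,len(arr)-1
--     result=-1
--
--     while low<=high:
--         mid=(low+high) // 2
--
--         if arr[mid]==1:
--             result=mid       # potential answer
--             high=mid - 1     # search left half for earlier 1
--         else:
--             low=mid + 1      # search right half for 1's
--
--     return result
-- ===== SOURCE B (Python) =====
-- def firstIndex(arr):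
--     # Same mid-point decision sequence as the iterative search, but as a
--     # divide-and-conquer helper returning Optional[int] (None = no 1 found),
--     # combined with "prefer the earlier hit from the left half".
--     def search(low, high):
--         if high < low:
--             return None
--         mid = (low + high) // 2
--         if arr[mid] == 1:
--             found = search(low, mid - 1)
--             return mid if found is None else found
--         return search(mid + 1, high)
--
--     res = search(0, len(arr) - 1)
--     return res if res is not None else -1
-- ===== Notes on version B (the rewrite author's own statement) =====
-- stated objective: alternative
-- what changed: Replaced the iterative while-loop that mutates low/high and a result accumulator by a recursive divide-and-conquer helper returning Optional[int] (None = not found), where a hit at mid yields the left half's result if any, else mid.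
import Mathlib
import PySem

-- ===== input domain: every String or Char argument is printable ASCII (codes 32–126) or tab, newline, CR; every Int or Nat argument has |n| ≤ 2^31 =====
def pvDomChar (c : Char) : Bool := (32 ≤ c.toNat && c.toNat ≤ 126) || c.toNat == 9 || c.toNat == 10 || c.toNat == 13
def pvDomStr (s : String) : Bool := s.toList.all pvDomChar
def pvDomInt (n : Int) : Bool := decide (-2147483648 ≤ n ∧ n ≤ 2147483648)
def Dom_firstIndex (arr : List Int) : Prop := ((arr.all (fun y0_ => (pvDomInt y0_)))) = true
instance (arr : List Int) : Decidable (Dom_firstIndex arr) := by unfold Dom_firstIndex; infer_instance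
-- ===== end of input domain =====

-- B replaces A's iterative while-loop with a mutable result accumulator by a recursive
-- divide-and-conquer helper returning Option Int; same cost, proved equal on all inputs.

-- ===== PORT A =====
-- A's while loop, recursing on the state (low, high, result).
def pvLoopA (arr : List Int) (low high result : Int) : Int :=
  if _h : low ≤ high then
    let mid := PySem.Int.floordiv (low + high) 2
    if (PySem.List.pyGet? arr mid).getD 0 == 1 then
      pvLoopA arr low (mid - 1) mid
    else
      pvLoopA arr (mid + 1) high result
  else result
termination_by (high + 1 - low).toNat
decreasing_by
  · have := PySem.Int.floordiv_two_mid_bounds (lo := low) (hi := high) _h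
    omega
  · have := PySem.Int.floordiv_two_mid_bounds (lo := low) (hi := high) _h
    omega

def firstIndex (arr : List Int) : Int :=
  pvLoopA arr 0 ((arr.length : Int) - 1) (-1)

-- ===== PORT B =====
-- Source B's search(low, high): None on an empty range; on a hit at mid, the left half's
-- result if any, else mid. The interval shrinks each call, so a fuel of the initial
-- interval length (arr.length) is exact; otherwise step for step Source B's code.
def pvSearchB (arr : List Int) : Nat → Int → Int → Option Int
  | 0, _, _ => none
  | Nat.succ f, low, high =>
    if high < low then none
    else
      let mid := PySem.Int.floordiv (low + high) 2
      match PySem.List.pyGet? arr mid with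
      | some v =>
        if v = 1 then some ((pvSearchB arr f low (mid - 1)).getD mid)
        else pvSearchB arr f (mid + 1) high
      | none => pvSearchB arr f (mid + 1) high

def firstIndex_alt (arr : List Int) : Int :=
  match pvSearchB arr arr.length 0 ((arr.length : Int) - 1) with
  | some res => res
  | none => -1

-- ===== PRECONDITION & SPEC =====
def Spec_firstIndex (arr : List Int) (out : Int) : Prop := out = firstIndex_alt arr
instance (arr : List Int) (out : Int) : Decidable (Spec_firstIndex arr out) := by unfold Spec_firstIndex; infer_instance

-- ===== CLAIM (what is proved, stated in full; the proofs are below) =====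
def Claim_equal_firstIndex : Prop := ∀ (arr : List Int), Dom_firstIndex arr → Spec_firstIndex arr (firstIndex arr)

-- ===== LEMMAS AND PROOFS =====

-- The accumulator loop equals the Option-valued search with the accumulator as default.
theorem pvLoopA_eq_searchB (arr : List Int) (fuel : Nat) (low high result : Int)
    (hf : (high + 1 - low).toNat ≤ fuel) :
    pvLoopA arr low high result = (pvSearchB arr fuel low high).getD result := by
  induction fuel generalizing low high result with
  | zero =>
    rw [pvLoopA]
    have h : ¬ low ≤ high := by omega
    simp [pvSearchB, h]
  | succ f ih =>
    rw [pvLoopA]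
    by_cases h : low ≤ high
    · have hmid := PySem.Int.floordiv_two_mid_bounds (lo := low) (hi := high) h
      simp only [h, dif_pos]
      rw [pvSearchB]
      simp only [show ¬ high < low by omega, if_neg, not_false_iff]
      set mid := PySem.Int.floordiv (low + high) 2 with hmiddef
      cases hg : PySem.List.pyGet? arr mid with
      | none =>
        simp only [Option.getD_none]
        rw [ih (mid + 1) high result (by omega)]
        simp
      | some v =>
        simp only [Option.getD_some]
        by_cases hv : v = 1
        · simp only [hv, beq_self_eq_true, if_pos]
          rw [ih low (mid - 1) mid (by omega)]
          simp
        · rw [if_neg (by simpa using hv), if_neg hv,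
              ih (mid + 1) high result (by omega)]
    · rw [pvSearchB]
      simp [h, show high < low by omega]

-- ===== VERDICT (by name: the statement is the Claim_ definition above) =====
theorem firstIndex_spec : Claim_equal_firstIndex := by
  intro arr _
  unfold Spec_firstIndex firstIndex firstIndex_alt
  rw [pvLoopA_eq_searchB arr arr.length 0 ((arr.length : Int) - 1) (-1) (by omega)]
  cases pvSearchB arr arr.length 0 ((arr.length : Int) - 1) <;> simp
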